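-- pv_equiv track=rewrite | github.com/pnnl/SAMIAm | utils.py | get_chips
-- ===== SOURCE A (Python) =====
-- def get_chips(matrix, window_size):
--     n = len(matrix)
--     m = window_size
--     filtered_submatrices = []
--
--     for i in range(n - m + 1):
--         for j in range(n - m + 1):
--             submatrix = [row[j:j+m] for row in matrix[i:i+m]]  # Extract submatrix as a list
--             if all(all(cell for cell in row) for row in submatrix):  # Check if all values are True
--                 filtered_submatrices.append([i,j,m])
--
--     return filtered_submatrices
-- ===== SOURCE B (Python) =====
-- def get_chips(matrix, window_size):
--     n = len(matrix)
--     m = window_size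
--     span = n - m + 1
--     if span <= 0:
--         return []
--     # per-row prefix counts of falsy cells: prefs[r][c] = # of falsy cells among row r's first c cells
--     prefs = []
--     for row in matrix:
--         p = [0]
--         z = 0
--         for cell in row:
--             z += 0 if cell else 1
--             p.append(z)
--         prefs.append(p)
--     # per-column prefix counts (down the rows) of rows whose clipped slice [j:j+m] contains a falsy cell
--     badcols = []
--     for j in range(span):
--         bad = [0]
--         b = 0
--         for p in prefs:
--             L = len(p) - 1
--             b += 0 if p[min(j + m, L)] == p[min(j, L)] else 1
--             bad.append(b)
--         badcols.append(bad)
--     chips = []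
--     for i in range(span):
--         for j in range(span):
--             if badcols[j][i + m] == badcols[j][i]:
--                 chips.append([i, j, m])
--     return chips
-- ===== Notes on version B (the rewrite author's own statement) =====
-- stated objective: alternative
-- what changed: B replaces A's per-window rescan of every cell (extracting and checking an m*m submatrix at each of the (n-m+1)^2 positions) with precomputed prefix counts of falsy cells -- one 1D prefix per row, then one per column of window-row verdicts -- so each window is decided by two table lookups.
-- outside the precondition, e.g. on get_chips([], -1): A returns [[0, 0, -1], [0, 1, -1], [1, 0, -1], [1, 1, -1]], B raises IndexError
import Mathlib
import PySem

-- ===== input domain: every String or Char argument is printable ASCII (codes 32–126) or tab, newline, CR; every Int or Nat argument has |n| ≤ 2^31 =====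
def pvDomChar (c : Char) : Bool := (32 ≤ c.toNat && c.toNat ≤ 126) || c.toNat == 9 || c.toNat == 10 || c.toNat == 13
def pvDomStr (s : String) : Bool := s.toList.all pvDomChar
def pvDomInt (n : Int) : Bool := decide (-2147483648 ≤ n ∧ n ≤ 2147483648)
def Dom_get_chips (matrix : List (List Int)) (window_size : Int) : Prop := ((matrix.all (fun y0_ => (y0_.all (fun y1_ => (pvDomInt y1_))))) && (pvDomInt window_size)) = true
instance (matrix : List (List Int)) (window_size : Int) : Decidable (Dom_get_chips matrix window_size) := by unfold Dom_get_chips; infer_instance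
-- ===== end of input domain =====

-- B replaces A's per-window rescan of every cell with precomputed prefix counts of falsy cells
-- (a 1D prefix per row, then a prefix per column of window-row verdicts) read off per window.

-- ===== PORT A =====
def get_chips (matrix : List (List Int)) (window_size : Int) : List (List Int) :=
  let n : Int := matrix.length
  let m := window_size
  (PySem.List.pyRange 0 (n - m + 1)).foldl (fun acc i =>
    (PySem.List.pyRange 0 (n - m + 1)).foldl (fun acc j =>
      let submatrix := (PySem.List.slice matrix (some i) (some (i + m))).map
        (fun row => PySem.List.slice row (some j) (some (j + m)))
      if submatrix.all (fun row => row.all (fun cell => cell != 0)) then acc ++ [[i, j, m]] else acc)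
      acc) []

-- ===== PORT B =====
def get_chips_alt (matrix : List (List Int)) (window_size : Int) : List (List Int) :=
  let n : Int := matrix.length
  let m := window_size
  let span := n - m + 1
  if span ≤ 0 then [] else
  -- per-row prefix counts of falsy cells
  let prefs := matrix.foldl (fun (prefs : List (List Int)) row =>
    let pz := row.foldl (fun (pz : List Int × Int) cell =>
      let z := pz.2 + (if cell == 0 then (1 : Int) else 0)
      (pz.1 ++ [z], z)) ([0], 0)
    prefs ++ [pz.1]) []
  -- per-column prefix counts (down the rows) of rows whose clipped slice [j:j+m] contains a falsy cell
  let badcols := (PySem.List.pyRange 0 span).foldl (fun (badcols : List (List Int)) j =>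
    let bb := prefs.foldl (fun (bb : List Int × Int) p =>
      let L : Int := (p.length : Int) - 1
      let b := bb.2 + (if PySem.List.pyGetD p (min (j + m) L) 0 == PySem.List.pyGetD p (min j L) 0 then (0 : Int) else 1)
      (bb.1 ++ [b], b)) ([0], 0)
    badcols ++ [bb.1]) []
  (PySem.List.pyRange 0 span).foldl (fun acc i =>
    (PySem.List.pyRange 0 span).foldl (fun acc j =>
      if PySem.List.pyGetD (PySem.List.pyGetD badcols j []) (i + m) 0 ==
         PySem.List.pyGetD (PySem.List.pyGetD badcols j []) i 0
      then acc ++ [[i, j, m]] else acc) acc) []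

-- ===== PRECONDITION & SPEC =====
-- Pre_ excludes negative window sizes, on which A's result is an accident of Python's
-- negative-slice-endpoint wraparound while B's own indexing raises IndexError.
def Pre_get_chips (matrix : List (List Int)) (window_size : Int) : Prop := 0 ≤ window_size
instance (matrix : List (List Int)) (window_size : Int) : Decidable (Pre_get_chips matrix window_size) := by unfold Pre_get_chips; infer_instance
def pvWitness_get_chips : List (List Int) × Int := ([[1, 2], [3, 0]], 1)
def Spec_get_chips (matrix : List (List Int)) (window_size : Int) (out : List (List Int)) : Prop := out = get_chips_alt matrix window_size
instance (matrix : List (List Int)) (window_size : Int) (out : List (List Int)) : Decidable (Spec_get_chips matrix window_size out) := by unfold Spec_get_chips; infer_instance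

-- ===== CLAIM (what is proved, stated in full; the proofs are below) =====
def Claim_equal_get_chips : Prop := ∀ (matrix : List (List Int)) (window_size : Int), Dom_get_chips matrix window_size → Pre_get_chips matrix window_size → Spec_get_chips matrix window_size (get_chips matrix window_size)

-- ===== LEMMAS AND PROOFS =====

-- the prefix list a Python 'p=[0]; for x in xs: z += (1 if p(x) else 0); p.append(z)' loop builds
lemma pvPrefixFoldAux {α : Type} (w : α → Int) (xs : List α) (acc : List Int) (z : Int) :
    xs.foldl (fun (s : List Int × Int) a => (s.1 ++ [s.2 + w a], s.2 + w a)) (acc, z)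
    = (acc ++ (List.range xs.length).map (fun c => z + ((xs.take (c + 1)).map w).sum),
       z + (xs.map w).sum) := by
  induction xs generalizing acc z with
  | nil => simp
  | cons x t ih =>
    simp only [List.foldl_cons]
    rw [ih]
    simp [List.range_succ_eq_map, List.map_map, Function.comp, add_assoc]

lemma pvPrefixFold {α : Type} (p : α → Bool) (xs : List α) :
    xs.foldl (fun (s : List Int × Int) a =>
        (s.1 ++ [s.2 + (if p a then (1 : Int) else 0)], s.2 + (if p a then (1 : Int) else 0)))
      ([0], 0)
    = ((List.range (xs.length + 1)).map (fun c => ((xs.take c).countP p : Int)),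
       (xs.countP p : Int)) := by
  rw [pvPrefixFoldAux (fun a => if p a then (1 : Int) else 0) xs [0] 0]
  simp only [zero_add, Prod.mk.injEq]
  refine ⟨?_, ?_⟩
  · rw [List.range_succ_eq_map]
    simp only [List.map_cons, List.singleton_append]
    congr 1
    rw [List.map_map]
    apply List.map_congr_left
    intro c _
    simp only [Function.comp_apply, Nat.succ_eq_add_one]
    rw [PySem.List.sum_map_ite_one_zero]
  · rw [← PySem.List.sum_map_ite_one_zero p xs]

-- window check through a prefix list: counts agree iff the window has no hit
lemma pvCountWindow {α : Type} (xs : List α) (p : α → Bool) (a b : Nat) (hab : a ≤ b) :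
    ((xs.take b).countP p = (xs.take a).countP p)
    ↔ ((xs.drop a).take (b - a)).all (fun x => !p x) = true := by
  obtain ⟨k, rfl⟩ : ∃ k, b = a + k := ⟨b - a, by omega⟩
  simp only [Nat.add_sub_cancel_left]
  rw [List.take_add, List.countP_append]
  constructor
  · intro h
    have h0 : (List.countP p (List.take k (List.drop a xs))) = 0 := by omega
    simp only [List.all_eq_true, Bool.not_eq_true']
    exact fun x hx => by simpa using List.countP_eq_zero.mp h0 x hx
  · intro h
    have h0 : (List.countP p (List.take k (List.drop a xs))) = 0 := by
      rw [List.countP_eq_zero]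
      intro x hx
      simpa using (List.all_eq_true.mp h x hx)
    omega

-- indexing the prefix list
lemma pvPrefGet {α : Type} (xs : List α) (p : α → Bool) (k : Int) (h0 : 0 ≤ k)
    (h1 : k ≤ (xs.length : Int)) :
    PySem.List.pyGetD ((List.range (xs.length + 1)).map (fun c => ((xs.take c).countP p : Int))) k 0
    = ((xs.take k.toNat).countP p : Int) := by
  rw [PySem.List.pyGetD_eq_getElem _ _ h0 (by simp; omega)]
  simp

-- clamping the index to the list length does not change the prefix count
lemma pvCountTakeMin {α : Type} (xs : List α) (p : α → Bool) (k : Int) (h0 : 0 ≤ k) :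
    ((xs.take (min k (xs.length : Int)).toNat).countP p) = ((xs.take k.toNat).countP p) := by
  rcases le_or_gt k (xs.length : Int) with h | h
  · rw [min_eq_left h]
  · rw [min_eq_right (le_of_lt h)]
    rw [List.take_of_length_le (by omega), List.take_of_length_le (by omega)]

-- the single-row verdict computed from the row's prefix list
lemma pvRowOk (row : List Int) (j m : Int) (hj : 0 ≤ j) (hm : 0 ≤ m) :
    (PySem.List.pyGetD ((List.range (row.length + 1)).map
          (fun c => ((row.take c).countP (fun x => x == 0) : Int))) (min (j + m) (row.length : Int)) 0
      == PySem.List.pyGetD ((List.range (row.length + 1)).map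
          (fun c => ((row.take c).countP (fun x => x == 0) : Int))) (min j (row.length : Int)) 0)
    = (PySem.List.slice row (some j) (some (j + m))).all (fun c => c != 0) := by
  have hlen : (0 : Int) ≤ (row.length : Int) := Int.natCast_nonneg _
  rw [pvPrefGet _ _ _ (le_min (by omega) hlen) (min_le_right _ _),
      pvPrefGet _ _ _ (le_min hj hlen) (min_le_right _ _),
      pvCountTakeMin _ _ _ (by omega), pvCountTakeMin _ _ _ hj,
      PySem.List.slice_toNat row hj (by omega)]
  rw [Bool.eq_iff_iff]
  simp only [beq_iff_eq, Nat.cast_inj]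
  rw [pvCountWindow row (fun x => x == 0) j.toNat (j + m).toNat (by omega)]
  simp [bne]

-- the whole-window verdict computed from the bad-row prefix list
lemma pvColOk (matrix : List (List Int)) (q : List Int → Bool) (i m : Int) (hi : 0 ≤ i) (hm : 0 ≤ m)
    (hin : i + m ≤ (matrix.length : Int)) :
    (PySem.List.pyGetD ((List.range (matrix.length + 1)).map
          (fun c => ((matrix.take c).countP (fun r => !q r) : Int))) (i + m) 0
      == PySem.List.pyGetD ((List.range (matrix.length + 1)).map
          (fun c => ((matrix.take c).countP (fun r => !q r) : Int))) i 0)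
    = (PySem.List.slice matrix (some i) (some (i + m))).all q := by
  rw [pvPrefGet _ _ _ (by omega) hin,
      pvPrefGet _ _ _ hi (by omega),
      PySem.List.slice_toNat matrix hi (by omega)]
  rw [Bool.eq_iff_iff]
  simp only [beq_iff_eq, Nat.cast_inj]
  rw [pvCountWindow matrix (fun r => !q r) i.toNat (i + m).toNat (by omega)]
  simp

-- proof-side vocabulary: the row prefix list, the row/window verdicts, and the common normal form
def pvRowPref (row : List Int) : List Int :=
  (List.range (row.length + 1)).map (fun c => ((row.take c).countP (fun x => x == 0) : Int))

def pvOk (m j : Int) (row : List Int) : Bool :=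
  (PySem.List.slice row (some j) (some (j + m))).all (fun c => c != 0)

def pvBad (m j : Int) (matrix : List (List Int)) : List Int :=
  (List.range (matrix.length + 1)).map (fun c => ((matrix.take c).countP (fun r => !pvOk m j r) : Int))

def pvCommon (matrix : List (List Int)) (m : Int) : List (List Int) :=
  (PySem.List.pyRange 0 ((matrix.length : Int) - m + 1)).foldl (fun acc i =>
    (PySem.List.pyRange 0 ((matrix.length : Int) - m + 1)).foldl (fun acc j =>
      if (PySem.List.slice matrix (some i) (some (i + m))).all (pvOk m j) then acc ++ [[i, j, m]]
      else acc) acc) []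

-- A's double loop in normal form
lemma pvA_eq (matrix : List (List Int)) (m : Int) : get_chips matrix m = pvCommon matrix m := by
  simp only [get_chips, pvCommon, List.all_map, Function.comp_def]
  rfl

-- the row loop of B builds the row prefix lists
lemma pvPrefs_eq (matrix : List (List Int)) :
    matrix.foldl (fun (prefs : List (List Int)) row =>
      prefs ++ [(row.foldl (fun (pz : List Int × Int) cell =>
        (pz.1 ++ [pz.2 + (if cell == 0 then (1 : Int) else 0)],
         pz.2 + (if cell == 0 then (1 : Int) else 0))) ([0], 0)).1]) []
    = matrix.map pvRowPref := by
  have h : ∀ (acc : List (List Int)), ∀ row ∈ matrix,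
      acc ++ [(row.foldl (fun (pz : List Int × Int) cell =>
        (pz.1 ++ [pz.2 + (if cell == 0 then (1 : Int) else 0)],
         pz.2 + (if cell == 0 then (1 : Int) else 0))) ([0], 0)).1]
      = acc ++ [pvRowPref row] := by
    intro acc row _
    rw [pvPrefixFold (fun cell => cell == 0) row]
    rfl
  rw [PySem.List.foldl_congr_mem _ _ (fun acc row => acc ++ [pvRowPref row]) _ h,
      PySem.List.foldl_append_singleton_eq_map]
  rfl

-- the column loop of B builds the bad-row prefix list for column j
lemma pvColFold (matrix : List (List Int)) (m j : Int) (hm : 0 ≤ m) (hj : 0 ≤ j) :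
    (matrix.map pvRowPref).foldl (fun (bb : List Int × Int) p =>
      (bb.1 ++ [bb.2 + (if PySem.List.pyGetD p (min (j + m) ((p.length : Int) - 1)) 0 ==
            PySem.List.pyGetD p (min j ((p.length : Int) - 1)) 0 then (0 : Int) else 1)],
       bb.2 + (if PySem.List.pyGetD p (min (j + m) ((p.length : Int) - 1)) 0 ==
            PySem.List.pyGetD p (min j ((p.length : Int) - 1)) 0 then (0 : Int) else 1))) ([0], 0)
    = (pvBad m j matrix, (matrix.countP (fun r => !pvOk m j r) : Int)) := by
  rw [List.foldl_map]
  have h : ∀ (bb : List Int × Int), ∀ row ∈ matrix,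
      (bb.1 ++ [bb.2 + (if PySem.List.pyGetD (pvRowPref row) (min (j + m) (((pvRowPref row).length : Int) - 1)) 0 ==
            PySem.List.pyGetD (pvRowPref row) (min j (((pvRowPref row).length : Int) - 1)) 0 then (0 : Int) else 1)],
       bb.2 + (if PySem.List.pyGetD (pvRowPref row) (min (j + m) (((pvRowPref row).length : Int) - 1)) 0 ==
            PySem.List.pyGetD (pvRowPref row) (min j (((pvRowPref row).length : Int) - 1)) 0 then (0 : Int) else 1))
      = (bb.1 ++ [bb.2 + (if (fun r => !pvOk m j r) row then (1 : Int) else 0)],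
         bb.2 + (if (fun r => !pvOk m j r) row then (1 : Int) else 0)) := by
    intro bb row _
    have hlen : ((pvRowPref row).length : Int) - 1 = (row.length : Int) := by
      simp [pvRowPref]
    rw [hlen]
    have hcond : (PySem.List.pyGetD (pvRowPref row) (min (j + m) ((row.length : Int))) 0 ==
        PySem.List.pyGetD (pvRowPref row) (min j ((row.length : Int))) 0) = pvOk m j row := by
      simpa [pvRowPref, pvOk] using pvRowOk row j m hj hm
    rw [hcond]
    cases h : pvOk m j row <;> simp [h]
  rw [PySem.List.foldl_congr_mem _ _ _ _ h, pvPrefixFold (fun r => !pvOk m j r) matrix]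
  rfl

-- B's double loop in the same normal form
lemma pvB_eq (matrix : List (List Int)) (m : Int) (hm : 0 ≤ m) :
    get_chips_alt matrix m = pvCommon matrix m := by
  simp only [get_chips_alt]
  by_cases hspan : (matrix.length : Int) - m + 1 ≤ 0
  · rw [if_pos hspan]
    unfold pvCommon
    rw [PySem.List.pyRange_one_eq_nil (by omega)]
    rfl
  rw [if_neg hspan]
  rw [pvPrefs_eq]
  have hbad : (PySem.List.pyRange 0 ((matrix.length : Int) - m + 1)).foldl
      (fun (badcols : List (List Int)) j =>
        badcols ++ [((matrix.map pvRowPref).foldl (fun (bb : List Int × Int) p =>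
          (bb.1 ++ [bb.2 + (if PySem.List.pyGetD p (min (j + m) ((p.length : Int) - 1)) 0 ==
                PySem.List.pyGetD p (min j ((p.length : Int) - 1)) 0 then (0 : Int) else 1)],
           bb.2 + (if PySem.List.pyGetD p (min (j + m) ((p.length : Int) - 1)) 0 ==
                PySem.List.pyGetD p (min j ((p.length : Int) - 1)) 0 then (0 : Int) else 1))) ([0], 0)).1]) []
      = (PySem.List.pyRange 0 ((matrix.length : Int) - m + 1)).map (fun j => pvBad m j matrix) := by
    have h : ∀ (acc : List (List Int)), ∀ j ∈ PySem.List.pyRange 0 ((matrix.length : Int) - m + 1),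
        acc ++ [((matrix.map pvRowPref).foldl (fun (bb : List Int × Int) p =>
          (bb.1 ++ [bb.2 + (if PySem.List.pyGetD p (min (j + m) ((p.length : Int) - 1)) 0 ==
                PySem.List.pyGetD p (min j ((p.length : Int) - 1)) 0 then (0 : Int) else 1)],
           bb.2 + (if PySem.List.pyGetD p (min (j + m) ((p.length : Int) - 1)) 0 ==
                PySem.List.pyGetD p (min j ((p.length : Int) - 1)) 0 then (0 : Int) else 1))) ([0], 0)).1]
        = acc ++ [pvBad m j matrix] := by
      intro acc j hjmem
      have hj : 0 ≤ j := (PySem.List.mem_pyRange_one.mp hjmem).1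
      rw [pvColFold matrix m j hm hj]
    rw [PySem.List.foldl_congr_mem _ _ (fun acc j => acc ++ [pvBad m j matrix]) _ h,
        PySem.List.foldl_append_singleton_eq_map]
    rfl
  rw [hbad]
  unfold pvCommon
  apply PySem.List.foldl_congr_mem
  intro acc i himem
  obtain ⟨hi0, hi1⟩ := PySem.List.mem_pyRange_one.mp himem
  apply PySem.List.foldl_congr_mem
  intro acc2 j hjmem
  obtain ⟨hj0, hj1⟩ := PySem.List.mem_pyRange_one.mp hjmem
  rw [PySem.List.pyGetD_map_pyRange_of_nonneg (fun j => pvBad m j matrix) _ j [] hj0 hj1]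
  have hcond : (PySem.List.pyGetD (pvBad m j matrix) (i + m) 0 ==
      PySem.List.pyGetD (pvBad m j matrix) i 0)
      = (PySem.List.slice matrix (some i) (some (i + m))).all (pvOk m j) := by
    simpa [pvBad] using pvColOk matrix (pvOk m j) i m hi0 hm (by omega)
  rw [hcond]

-- ===== VERDICT (by name: the statement is the Claim_ definition above) =====
theorem get_chips_spec : Claim_equal_get_chips := by
  intro matrix window_size _hdom hpre
  unfold Spec_get_chips
  rw [pvA_eq, pvB_eq matrix window_size hpre]
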